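-- pv_equiv track=rewrite | github.com/agarcia967/Coin_Tracker | coin_parsing.py | _beginsWithNumber
-- ===== SOURCE A (Python) =====
-- def _beginsWithNumber(str):
--     """
--     This function returns the index of a string up
--     to the point where there are no more digits.
--
--     String may then be called with string[:r],
--     or it may be called with string[r:].
--     """
--     digits=["0","1","2","3","4","5","6","7","8","9"]
--     r=0
--     for i in range(len(str)):
--         if str[i] in digits:
--             r+=1#increments if there is a digit
--         else:
--             return r
--     return r
-- ===== SOURCE B (Python) =====
-- def _beginsWithNumber(str):
--     """Length of the leading ASCII-digit prefix, via lstrip (no explicit loop)."""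
--     return len(str) - len(str.lstrip("0123456789"))
-- ===== Notes on version B (the rewrite author's own statement) =====
-- stated objective: simpler
-- what changed: Replaces the explicit index loop with early return by a single single lstrip call with the ten ASCII digit characters: the length difference is exactly the leading-digit-run length.
import Mathlib
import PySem

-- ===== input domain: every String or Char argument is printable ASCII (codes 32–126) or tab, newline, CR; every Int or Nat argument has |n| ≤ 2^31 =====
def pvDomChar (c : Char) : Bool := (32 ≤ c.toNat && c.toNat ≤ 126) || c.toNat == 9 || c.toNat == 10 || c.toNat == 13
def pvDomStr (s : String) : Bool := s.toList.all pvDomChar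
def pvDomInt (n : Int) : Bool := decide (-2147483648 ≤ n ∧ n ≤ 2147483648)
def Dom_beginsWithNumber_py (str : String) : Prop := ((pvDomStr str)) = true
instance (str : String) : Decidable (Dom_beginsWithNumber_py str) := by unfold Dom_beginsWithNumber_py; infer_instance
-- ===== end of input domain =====

-- B replaces A's explicit per-character loop by one lstrip("0123456789") call (objective: simpler).

-- ===== PORT A =====
-- A's digit list of one-character strings, as chars (str[i] is one code point)
def pvDigitsA : List Char := ['0','1','2','3','4','5','6','7','8','9']

-- the 'for i in range(len(str))' loop with counter r and early return, as recursion over the chars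
def pvGoA : List Char → Int → Int
  | [], r => r
  | c :: cs, r => if pvDigitsA.contains c then pvGoA cs (r + 1) else r

def beginsWithNumber_py (str : String) : Int := pvGoA str.toList 0

-- ===== PORT B =====
-- PySem has no lstrip-with-chars primitive; s.lstrip("0123456789") removes exactly the
-- leading run of those code points, i.e. dropWhile membership on the char list — exact here.
def beginsWithNumber_py_alt (str : String) : Int :=
  (str.toList.length : Int) -
    ((str.toList.dropWhile (fun c => ("0123456789".toList).contains c)).length : Int)

-- ===== PRECONDITION & SPEC =====
def Spec_beginsWithNumber_py (str : String) (out : Int) : Prop := out = beginsWithNumber_py_alt str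
instance (str : String) (out : Int) : Decidable (Spec_beginsWithNumber_py str out) := by unfold Spec_beginsWithNumber_py; infer_instance

-- ===== CLAIM (what is proved, stated in full; the proofs are below) =====
def Claim_equal_beginsWithNumber_py : Prop := ∀ (str : String), Dom_beginsWithNumber_py str → Spec_beginsWithNumber_py str (beginsWithNumber_py str)

-- ===== LEMMAS AND PROOFS =====

-- A's loop counts the leading run: pvGoA cs r = r + |takeWhile digit cs|
theorem pvGoA_eq (cs : List Char) :
    ∀ r : Int, pvGoA cs r = r + ((cs.takeWhile (fun c => pvDigitsA.contains c)).length : Int) := by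
  induction cs with
  | nil => intro r; simp [pvGoA]
  | cons c cs ih =>
    intro r
    by_cases h : c ∈ pvDigitsA
    · simp [pvGoA, h, ih]
      ring
    · simp [pvGoA, h]

-- ===== VERDICT (by name: the statement is the Claim_ definition above) =====
theorem beginsWithNumber_py_spec : Claim_equal_beginsWithNumber_py := by
  intro s _
  unfold Spec_beginsWithNumber_py beginsWithNumber_py beginsWithNumber_py_alt
  rw [pvGoA_eq]
  have hset : ("0123456789".toList) = pvDigitsA := by decide
  rw [hset]
  have := congrArg List.length
    (List.takeWhile_append_dropWhile (p := fun c => pvDigitsA.contains c) (l := s.toList))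
  rw [List.length_append] at this
  omega
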